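-- pv_equiv track=rewrite | github.com/mcv-m6-video/mcv-c6-2026-team2 | Week1/task1/task1.py | remove_nested_boxes
-- ===== SOURCE A (Python) =====
-- def remove_nested_boxes(boxes):
--
--     keep = []
--
--     for i, boxA in enumerate(boxes):
--
--         x1A, y1A, x2A, y2A = boxA[:4]
--         areaA = (x2A - x1A) * (y2A - y1A)
--
--         nested = False
--
--         for j, boxB in enumerate(boxes):
--             if i == j:
--                 continue
--
--             x1B, y1B, x2B, y2B = boxB[:4]
--             areaB = (x2B - x1B) * (y2B - y1B)
--
--             xA = max(x1A, x1B)
--             yA = max(y1A, y1B)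
--             xB = min(x2A, x2B)
--             yB = min(y2A, y2B)
--
--             interW = max(0, xB - xA)
--             interH = max(0, yB - yA)
--             interArea = interW * interH
--
--             if interArea >= 0.9 * areaA and areaA < areaB:
--                 nested = True
--                 break
--
--         if not nested:
--             keep.append(boxA)
--
--     return keep
-- ===== SOURCE B (Python) =====
-- def remove_nested_boxes(boxes):
--     n = len(boxes)
--     coords = [(b[0], b[1], b[2], b[3]) for b in boxes]
--     areas = [(x2 - x1) * (y2 - y1) for (x1, y1, x2, y2) in coords]
--     order = sorted(range(n), key=lambda i: areas[i])
--     removed = [False] * n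
--     for p, i in enumerate(order):
--         x1A, y1A, x2A, y2A = coords[i]
--         areaA = areas[i]
--         for j in order[p + 1:]:
--             if areas[j] <= areaA:
--                 continue
--             x1B, y1B, x2B, y2B = coords[j]
--             interW = max(0, min(x2A, x2B) - max(x1A, x1B))
--             interH = max(0, min(y2A, y2B) - max(y1A, y1B))
--             if interW * interH >= 0.9 * areaA:
--                 removed[i] = True
--                 break
--     return [b for b, r in zip(boxes, removed) if not r]
-- ===== Notes on version B (the rewrite author's own statement) =====
-- stated objective: faster
-- what changed: B precomputes each box's coordinates and area once, sorts the indices by area ascending, and tests each box only against boxes later in that sorted order (the only candidates with strictly larger area), marking removals in a kept[] array and rebuilding the output in original order, instead of A's all-pairs inner rescan that re-slices and recomputes every area per pair.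
import Mathlib
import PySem

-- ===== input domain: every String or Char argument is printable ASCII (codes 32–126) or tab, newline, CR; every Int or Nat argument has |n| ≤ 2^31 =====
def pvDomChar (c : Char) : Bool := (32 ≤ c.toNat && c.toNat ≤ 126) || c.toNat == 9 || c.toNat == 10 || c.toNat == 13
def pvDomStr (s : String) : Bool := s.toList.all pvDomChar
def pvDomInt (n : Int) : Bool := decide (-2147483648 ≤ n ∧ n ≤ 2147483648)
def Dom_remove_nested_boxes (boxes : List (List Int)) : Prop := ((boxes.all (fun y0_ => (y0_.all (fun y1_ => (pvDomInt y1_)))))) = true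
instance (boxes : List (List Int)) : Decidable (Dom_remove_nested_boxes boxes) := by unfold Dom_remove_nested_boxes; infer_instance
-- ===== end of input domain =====

-- B removes each box by scanning only the boxes AFTER it in area-ascending sorted index order
-- (a strictly larger-area overlapping box can only sit there), instead of A's all-pairs rescan
-- that re-slices and re-computes every area in the inner loop; same return value, input order kept.

-- Shared float primitive: Python's `interArea >= 0.9 * areaA` on ints is an exact-rational
-- comparison of the int `interArea` with the IEEE double fl(0.9 * fl(areaA)).  `pvRne53 n`
-- rounds a positive integer to 53 significant bits (round-to-nearest, ties-to-even), i.e. the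
-- exact value of the nearest double; 8106479329266893 / 2^53 is the exact value of the literal
-- 0.9.  Exact for the intersection-area use (0 ≤ inter); checked against CPython.
def pvRne53 (n : Int) : Int :=
  let L := PySem.Int.bitLength n - 1
  if L ≤ 52 then n
  else
    let k : Nat := L - 52
    let q := n / ((2 : Int) ^ k)
    let r := n % ((2 : Int) ^ k)
    let h := (2 : Int) ^ (k - 1)
    (if h < r ∨ (r = h ∧ q % 2 = 1) then q + 1 else q) * (2 : Int) ^ k

def pvGeFloat09 (inter area : Int) : Bool :=
  if area ≤ 0 then true   -- 0.9 * areaA ≤ 0 ≤ interArea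
  else decide (inter * 2 ^ 53 ≥ pvRne53 (8106479329266893 * pvRne53 area))

-- ===== PORT A =====
-- inner `for j, boxB in enumerate(boxes): …` with `continue`/`break`
def pvInnerA (i x1A y1A x2A y2A areaA : Int) : List (Int × List Int) → Bool
  | [] => false
  | (j, boxB) :: rest =>
    if i == j then pvInnerA i x1A y1A x2A y2A areaA rest
    else
      match PySem.List.slice boxB none (some 4) with
      | [x1B, y1B, x2B, y2B] =>
        let areaB := (x2B - x1B) * (y2B - y1B)
        let xA := max x1A x1B
        let yA := max y1A y1B
        let xB := min x2A x2B
        let yB := min y2A y2B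
        let interW := max 0 (xB - xA)
        let interH := max 0 (yB - yA)
        let interArea := interW * interH
        if pvGeFloat09 interArea areaA && decide (areaA < areaB) then true
        else pvInnerA i x1A y1A x2A y2A areaA rest
      | _ => false   -- unpacking `boxB[:4]` raises ValueError: excluded by Pre_

-- outer `for i, boxA in enumerate(boxes): …` accumulating `keep`
def pvOuterA (boxes : List (List Int)) : List (Int × List Int) → List (List Int) → List (List Int)
  | [], keep => keep
  | (i, boxA) :: rest, keep =>
    match PySem.List.slice boxA none (some 4) with
    | [x1A, y1A, x2A, y2A] =>
      let areaA := (x2A - x1A) * (y2A - y1A)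
      let nested := pvInnerA i x1A y1A x2A y2A areaA (PySem.List.enumerate boxes)
      if nested then pvOuterA boxes rest keep
      else pvOuterA boxes rest (keep ++ [boxA])
    | _ => keep   -- unpacking `boxA[:4]` raises ValueError: excluded by Pre_

def remove_nested_boxes (boxes : List (List Int)) : List (List Int) :=
  pvOuterA boxes (PySem.List.enumerate boxes) []

-- ===== PORT B =====
-- inner `for j in order[p+1:]: …` with `continue`/`break`
def pvFindB (coords : List (Int × Int × Int × Int)) (areas : List Int)
    (x1A y1A x2A y2A areaA : Int) : List Int → Bool
  | [] => false
  | j :: rest =>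
    if PySem.List.pyGetD areas j 0 ≤ areaA then
      pvFindB coords areas x1A y1A x2A y2A areaA rest
    else
      let (x1B, y1B, x2B, y2B) := PySem.List.pyGetD coords j (0, 0, 0, 0)
      let interW := max 0 (min x2A x2B - max x1A x1B)
      let interH := max 0 (min y2A y2B - max y1A y1B)
      if pvGeFloat09 (interW * interH) areaA then true
      else pvFindB coords areas x1A y1A x2A y2A areaA rest

-- `for p, i in enumerate(order): …` — the tail of the recursion IS order[p+1:]
def pvMarkB (coords : List (Int × Int × Int × Int)) (areas : List Int) :
    List Int → List Bool → List Bool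
  | [], removed => removed
  | i :: rest, removed =>
    let (x1A, y1A, x2A, y2A) := PySem.List.pyGetD coords i (0, 0, 0, 0)
    let areaA := PySem.List.pyGetD areas i 0
    if pvFindB coords areas x1A y1A x2A y2A areaA rest then
      pvMarkB coords areas rest (PySem.List.pySetD removed i true)
    else
      pvMarkB coords areas rest removed

def remove_nested_boxes_alt (boxes : List (List Int)) : List (List Int) :=
  let n := boxes.length
  let coords := boxes.map (fun b =>
    (PySem.List.pyGetD b 0 0, PySem.List.pyGetD b 1 0,
     PySem.List.pyGetD b 2 0, PySem.List.pyGetD b 3 0))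
  let areas := coords.map (fun c => (c.2.2.1 - c.1) * (c.2.2.2 - c.2.1))
  let order := PySem.List.sorted (PySem.List.pyRange 0 n 1)
    (fun i => PySem.List.pyGetD areas i 0) false
  let removed := pvMarkB coords areas order (List.replicate n false)
  ((boxes.zip removed).filter (fun p => !p.2)).map (fun p => p.1)

-- ===== PRECONDITION & SPEC =====
-- Pre_ excludes exactly the inputs where A raises ValueError: some box has fewer than 4 entries
-- (the unpacking `x1, y1, x2, y2 = box[:4]` fails there; B raises IndexError on them too).
def Pre_remove_nested_boxes (boxes : List (List Int)) : Prop :=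
  ∀ b ∈ boxes, 4 ≤ b.length
instance (boxes : List (List Int)) : Decidable (Pre_remove_nested_boxes boxes) := by
  unfold Pre_remove_nested_boxes; infer_instance

def pvWitness_remove_nested_boxes : List (List Int) := [[0, 0, 10, 10], [0, 0, 3, 3]]

def Spec_remove_nested_boxes (boxes : List (List Int)) (out : List (List Int)) : Prop := out = remove_nested_boxes_alt boxes
instance (boxes : List (List Int)) (out : List (List Int)) : Decidable (Spec_remove_nested_boxes boxes out) := by unfold Spec_remove_nested_boxes; infer_instance

-- ===== CLAIM (what is proved, stated in full; the proofs are below) =====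
def Claim_equal_remove_nested_boxes : Prop := ∀ (boxes : List (List Int)), Dom_remove_nested_boxes boxes → Pre_remove_nested_boxes boxes → Spec_remove_nested_boxes boxes (remove_nested_boxes boxes)

-- ===== LEMMAS AND PROOFS =====

-- the nesting test on raw boxes (first four entries), shared reference predicate
def pvCond4 (x1A y1A x2A y2A : Int) (b : List Int) : Bool :=
  let x1B := b.getD 0 0
  let y1B := b.getD 1 0
  let x2B := b.getD 2 0
  let y2B := b.getD 3 0
  let areaA := (x2A - x1A) * (y2A - y1A)
  let areaB := (x2B - x1B) * (y2B - y1B)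
  let inter := max 0 (min x2A x2B - max x1A x1B) * max 0 (min y2A y2B - max y1A y1B)
  pvGeFloat09 inter areaA && decide (areaA < areaB)

def pvCond (a b : List Int) : Bool :=
  pvCond4 (a.getD 0 0) (a.getD 1 0) (a.getD 2 0) (a.getD 3 0) b

theorem pvCond_self (a : List Int) : pvCond a a = false := by
  simp [pvCond, pvCond4]
theorem pvSlice4 (b : List Int) (h : 4 ≤ b.length) :
    PySem.List.slice b none (some 4) = [b.getD 0 0, b.getD 1 0, b.getD 2 0, b.getD 3 0] := by
  match b, h with
  | a :: b1 :: c :: d :: t, _ => simp [pysem]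

theorem pvInnerA_eq (i x1A y1A x2A y2A : Int) (l : List (Int × List Int))
    (hl : ∀ p ∈ l, 4 ≤ p.2.length) :
    pvInnerA i x1A y1A x2A y2A ((x2A - x1A) * (y2A - y1A)) l
      = l.any (fun p => (i != p.1) && pvCond4 x1A y1A x2A y2A p.2) := by
  induction l with
  | nil => rfl
  | cons p rest ih =>
    obtain ⟨j, boxB⟩ := p
    have hB : 4 ≤ boxB.length := hl (j, boxB) (by simp)
    have ihr := ih (fun q hq => hl q (by simp [hq]))
    simp only [pvInnerA, pvSlice4 boxB hB]
    by_cases hij : i = j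
    · subst hij
      simp [ihr, pvCond4]
    · simp only [beq_iff_eq, if_neg hij, List.any_cons]
      rw [ihr]
      have : (i != j) = true := by simp [hij]
      simp only [this, Bool.true_and]
      unfold pvCond4
      split <;> simp_all
theorem pvAnyEnum {α : Type} (f : α → Bool) (i : Int) :
    ∀ (xs : List α) (s : Int),
    (∀ (k : Nat) (hk : k < xs.length), s + k = i → f xs[k] = false) →
    (PySem.List.enumerate xs s).any (fun p => (i != p.1) && f p.2) = xs.any f := by
  intro xs
  induction xs with
  | nil => intro s h; rfl
  | cons x t ih =>
    intro s h
    rw [PySem.List.enumerate_cons]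
    simp only [List.any_cons]
    have ht := ih (s + 1) (fun k hk hs => by
      have := h (k + 1) (by simpa using hk) (by push_cast; omega)
      simpa using this)
    rw [ht]
    by_cases his : i = s
    · have hx : f x = false := by
        have := h 0 (by simp) (by omega)
        simpa using this
      simp [his, hx]
    · have hb : (i != s) = true := by simp [his]
      simp [hb]

theorem pvOuterA_eq (boxes : List (List Int)) (hpre : ∀ b ∈ boxes, 4 ≤ b.length) :
    ∀ (l : List (Int × List Int)) (keep : List (List Int)),
    (∀ p ∈ l, ∃ (k : Nat) (hk : k < boxes.length), p = ((k : Int), boxes[k])) →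
    pvOuterA boxes l keep = keep ++ (l.map (·.2)).filter (fun a => ! boxes.any (pvCond a)) := by
  intro l
  induction l with
  | nil => intro keep _; show pvOuterA boxes [] keep = _; rw [pvOuterA]; simp
  | cons p rest ih =>
    intro keep hl
    obtain ⟨k, hk, rfl⟩ := hl p (by simp)
    have hA : boxes[k] ∈ boxes := by simp
    have h4 : 4 ≤ (boxes[k] : List Int).length := hpre _ hA
    simp only [pvOuterA, pvSlice4 _ h4]
    rw [pvInnerA_eq _ _ _ _ _ _ (fun q hq => by
      rw [PySem.List.mem_enumerate_iff] at hq
      obtain ⟨m, hm, rfl⟩ := hq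
      exact hpre _ (by simp))]
    have hfold : (fun p : Int × List Int => ((k:Int) != p.1 && pvCond4 (boxes[k].getD 0 0) (boxes[k].getD 1 0) (boxes[k].getD 2 0) (boxes[k].getD 3 0) p.2)) = (fun p : Int × List Int => ((k:Int) != p.1 && pvCond boxes[k] p.2)) := rfl
    rw [hfold]
    rw [pvAnyEnum (fun b => pvCond boxes[k] b) (k : Int) boxes 0 (fun m hm hs => by
      have hmk : m = k := by omega
      subst hmk
      exact pvCond_self _)]
    have hrest : ∀ p ∈ rest, ∃ (k : Nat) (hk : k < boxes.length), p = ((k : Int), boxes[k]) :=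
      fun q hq => hl q (by simp [hq])
    by_cases hn : boxes.any (pvCond boxes[k]) = true
    · simp only [hn, if_true]
      rw [ih keep hrest]
      simp [hn]
    · simp only [Bool.not_eq_true] at hn
      simp only [hn]
      rw [ih (keep ++ [boxes[k]]) hrest]
      simp [hn]

theorem pvA_filter (boxes : List (List Int)) (hpre : ∀ b ∈ boxes, 4 ≤ b.length) :
    remove_nested_boxes boxes = boxes.filter (fun a => ! boxes.any (pvCond a)) := by
  unfold remove_nested_boxes
  rw [pvOuterA_eq boxes hpre _ [] (fun p hp => by
    rw [PySem.List.mem_enumerate_iff] at hp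
    obtain ⟨m, hm, rfl⟩ := hp
    exact ⟨m, hm, by simp⟩)]
  simp [PySem.List.map_snd_enumerate]

-- ===== B side =====
def pvF4 (b : List Int) : Int × Int × Int × Int :=
  (PySem.List.pyGetD b 0 0, PySem.List.pyGetD b 1 0,
   PySem.List.pyGetD b 2 0, PySem.List.pyGetD b 3 0)

def pvFCond (coords : List (Int × Int × Int × Int)) (areas : List Int)
    (x1A y1A x2A y2A areaA : Int) (j : Int) : Bool :=
  let (x1B, y1B, x2B, y2B) := PySem.List.pyGetD coords j (0, 0, 0, 0)
  let interW := max 0 (min x2A x2B - max x1A x1B)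
  let interH := max 0 (min y2A y2B - max y1A y1B)
  decide (PySem.List.pyGetD areas j 0 > areaA) && pvGeFloat09 (interW * interH) areaA

def pvG (coords : List (Int × Int × Int × Int)) (areas : List Int) (i : Int) : Int → Bool :=
  fun j =>
    let (x1A, y1A, x2A, y2A) := PySem.List.pyGetD coords i (0, 0, 0, 0)
    pvFCond coords areas x1A y1A x2A y2A (PySem.List.pyGetD areas i 0) j

theorem pvFindB_eq (coords : List (Int × Int × Int × Int)) (areas : List Int)
    (x1A y1A x2A y2A areaA : Int) (l : List Int) :
    pvFindB coords areas x1A y1A x2A y2A areaA l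
      = l.any (pvFCond coords areas x1A y1A x2A y2A areaA) := by
  induction l with
  | nil => rfl
  | cons j rest ih =>
    simp only [pvFindB, List.any_cons, ← ih]
    by_cases h : PySem.List.pyGetD areas j 0 ≤ areaA
    · have : pvFCond coords areas x1A y1A x2A y2A areaA j = false := by
        simp [pvFCond]; omega
      simp [h, this]
    · have hgt : decide (PySem.List.pyGetD areas j 0 > areaA) = true := by
        simp; omega
      simp only [if_neg h, pvFCond, hgt, Bool.true_and]
      split <;> simp_all

def pvMarkVal (g : Int → Bool) (t : Int) : List Int → Bool
  | [] => false
  | i :: rest => if i = t then rest.any g else pvMarkVal g t rest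

theorem pvMarkVal_not_mem (g : Int → Bool) (t : Int) (l : List Int) (h : t ∉ l) :
    pvMarkVal g t l = false := by
  induction l with
  | nil => rfl
  | cons i rest ih =>
    simp only [pvMarkVal]
    rw [if_neg (by simp at h; omega), ih (by simp at h; tauto)]

theorem pvMarkB_length (coords : List (Int × Int × Int × Int)) (areas : List Int) :
    ∀ (l : List Int) (removed : List Bool),
    (pvMarkB coords areas l removed).length = removed.length := by
  intro l
  induction l with
  | nil => intro removed; rfl
  | cons i rest ih =>
    intro removed
    rcases hco : PySem.List.pyGetD coords i (0, 0, 0, 0) with ⟨x1, y1, x2, y2⟩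
    simp only [pvMarkB, hco]
    split
    · rw [ih, PySem.List.length_pySetD]
    · exact ih removed

theorem pvMarkB_getD (coords : List (Int × Int × Int × Int)) (areas : List Int) :
    ∀ (l : List Int) (removed : List Bool) (t : Nat),
    (∀ j ∈ l, 0 ≤ j ∧ j < removed.length) → l.Nodup → t < removed.length →
    (pvMarkB coords areas l removed).getD t false
      = (removed.getD t false || pvMarkVal (pvG coords areas (t : Int)) (t : Int) l) := by
  intro l
  induction l with
  | nil => intro removed t _ _ _; simp [pvMarkB, pvMarkVal]
  | cons i rest ih =>
    intro removed t hb hnd ht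
    obtain ⟨hi0, hilt⟩ := hb i (by simp)
    have hbr : ∀ j ∈ rest, 0 ≤ j ∧ j < removed.length := fun j hj => hb j (by simp [hj])
    have hndr : rest.Nodup := (List.nodup_cons.mp hnd).2
    rcases hco : PySem.List.pyGetD coords i (0, 0, 0, 0) with ⟨x1, y1, x2, y2⟩
    simp only [pvMarkB, hco, pvFindB_eq]
    have hg : (pvFCond coords areas x1 y1 x2 y2 (PySem.List.pyGetD areas i 0))
        = pvG coords areas i := by
      funext j; simp only [pvG, hco]
    rw [hg]
    have hset : PySem.List.pySetD removed i true = removed.set i.toNat true :=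
      PySem.List.pySetD_of_nonneg (v := true) (xs := removed) hi0
    by_cases hit : i = (t : Int)
    · have hitn : i.toNat = t := by omega
      by_cases hf : rest.any (pvG coords areas i) = true
      · rw [if_pos hf]
        rw [ih _ t (by rw [hset]; simpa [List.length_set] using hbr) hndr
            (by simpa [hset, List.length_set] using ht)]
        have : (removed.set i.toNat true).getD t false = true := by
          simp [List.getD, hitn, ht]
        rw [hset, this]
        simp only [pvMarkVal, if_pos hit, hit ▸ hf]
        simp
      · rw [if_neg hf]
        rw [ih _ t hbr hndr ht]
        have hnm : (t : Int) ∉ rest := by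
          have := (List.nodup_cons.mp hnd).1
          rwa [hit] at this
        rw [pvMarkVal_not_mem _ _ _ hnm]
        simp only [pvMarkVal, if_pos hit]
        simp [← hit, hf]
    · by_cases hf : rest.any (pvG coords areas i) = true
      · rw [if_pos hf]
        rw [ih _ t (by rw [hset]; simpa [List.length_set] using hbr) hndr
            (by simpa [hset, List.length_set] using ht)]
        have hne : i.toNat ≠ t := by omega
        have : (removed.set i.toNat true).getD t false = removed.getD t false := by
          simp [List.getD, List.getElem?_set_ne hne]
        rw [hset, this]
        simp [pvMarkVal, if_neg hit]
      · rw [if_neg hf]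
        rw [ih _ t hbr hndr ht]
        simp [pvMarkVal, if_neg hit]

theorem pvF4_eq (b : List Int) :
    pvF4 b = (b.getD 0 0, b.getD 1 0, b.getD 2 0, b.getD 3 0) := by
  simp [pvF4, pysem]

theorem pvMarkVal_append (g : Int → Bool) (t : Int) (u v : List Int) (h : t ∉ u) :
    pvMarkVal g t (u ++ t :: v) = v.any g := by
  induction u with
  | nil => simp [pvMarkVal]
  | cons x u' ih =>
    simp only [List.cons_append, pvMarkVal]
    rw [if_neg (by simp at h; omega), ih (by simp at h; tauto)]

theorem pvZipFilter (f : List Int → Bool) : ∀ (bs : List (List Int)) (removed : List Bool),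
    removed.length = bs.length → (∀ (t : Nat) (h : t < bs.length), removed.getD t false = f bs[t]) →
    ((bs.zip removed).filter (fun p => !p.2)).map (fun p => p.1) = bs.filter (fun a => !f a) := by
  intro bs
  induction bs with
  | nil => intro removed _ _; simp
  | cons b bs' ih =>
    intro removed hlen hval
    match removed with
    | r :: rs =>
      have h0 : r = f b := by simpa using hval 0 (by simp)
      have := ih rs (by simpa using hlen) (fun t ht => by simpa using hval (t + 1) (by simp; omega))
      by_cases hr : f b = true
      · simp [h0, hr, this]
      · simp only [Bool.not_eq_true] at hr
        simp [h0, hr, this]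

theorem pvB_filter (boxes : List (List Int)) (_hpre : ∀ b ∈ boxes, 4 ≤ b.length) :
    remove_nested_boxes_alt boxes = boxes.filter (fun a => ! boxes.any (pvCond a)) := by
  have hC : ∀ (k : Nat) (hk : k < boxes.length),
      PySem.List.pyGetD (boxes.map pvF4) (k : Int) (0, 0, 0, 0) = pvF4 (boxes[k]'hk) := by
    intro k hk
    simp [pysem, List.getElem?_eq_getElem hk]
  have hA : ∀ (k : Nat) (hk : k < boxes.length),
      PySem.List.pyGetD ((boxes.map pvF4).map (fun c => (c.2.2.1 - c.1) * (c.2.2.2 - c.2.1))) (k : Int) 0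
        = ((boxes[k]'hk).getD 2 0 - (boxes[k]'hk).getD 0 0) * ((boxes[k]'hk).getD 3 0 - (boxes[k]'hk).getD 1 0) := by
    intro k hk
    simp [pysem, List.getElem?_eq_getElem hk, pvF4_eq, List.getD]
  have hG : ∀ (t k : Nat) (ht : t < boxes.length) (hk : k < boxes.length),
      pvG (boxes.map pvF4) ((boxes.map pvF4).map (fun c => (c.2.2.1 - c.1) * (c.2.2.2 - c.2.1))) (t : Int) (k : Int)
        = pvCond (boxes[t]'ht) (boxes[k]'hk) := by
    intro t k ht hk
    simp only [pvG, hC t ht, pvF4_eq]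
    simp only [pvFCond, hC k hk, hA k hk, hA t ht, pvF4_eq, pvCond, pvCond4]
    rw [Bool.and_comm]
  show ((boxes.zip (pvMarkB (boxes.map pvF4)
          ((boxes.map pvF4).map (fun c => (c.2.2.1 - c.1) * (c.2.2.2 - c.2.1)))
          (PySem.List.sorted (PySem.List.pyRange 0 boxes.length 1)
            (fun i => PySem.List.pyGetD ((boxes.map pvF4).map (fun c => (c.2.2.1 - c.1) * (c.2.2.2 - c.2.1))) i 0) false)
          (List.replicate boxes.length false))).filter (fun p => !p.2)).map (fun p => p.1)
      = boxes.filter (fun a => ! boxes.any (pvCond a))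
  apply pvZipFilter
  · rw [pvMarkB_length]; simp
  · intro t ht
    have hOmem : ∀ j : Int, j ∈ PySem.List.sorted (PySem.List.pyRange 0 boxes.length 1)
        (fun i => PySem.List.pyGetD ((boxes.map pvF4).map (fun c => (c.2.2.1 - c.1) * (c.2.2.2 - c.2.1))) i 0) false
        ↔ (0 ≤ j ∧ j < (boxes.length : Int)) := by
      intro j
      rw [PySem.List.mem_sorted, PySem.List.mem_pyRange_one]
    rw [pvMarkB_getD _ _ _ _ t
        (fun j hj => by rw [hOmem j] at hj; simpa using hj)
        ((PySem.List.sorted_perm _ _ _).nodup_iff.mpr (PySem.List.nodup_pyRange_one _ _))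
        (by simpa using ht)]
    have hrep : (List.replicate boxes.length false).getD t false = false := by
      simp [List.getD]
    rw [hrep, Bool.false_or]
    -- decompose the sorted order around position of t
    have hmem : ((t : Int)) ∈ PySem.List.sorted (PySem.List.pyRange 0 boxes.length 1)
        (fun i => PySem.List.pyGetD ((boxes.map pvF4).map (fun c => (c.2.2.1 - c.1) * (c.2.2.2 - c.2.1))) i 0) false := by
      rw [hOmem]; constructor <;> omega
    obtain ⟨u, v, huv⟩ := List.append_of_mem hmem
    have hndO := (PySem.List.sorted_perm (PySem.List.pyRange 0 boxes.length 1)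
        (fun i => PySem.List.pyGetD ((boxes.map pvF4).map (fun c => (c.2.2.1 - c.1) * (c.2.2.2 - c.2.1))) i 0) false).nodup_iff.mpr
        (PySem.List.nodup_pyRange_one _ _)
    have hpw := PySem.List.sorted_pairwise (xs := PySem.List.pyRange 0 boxes.length 1)
        (key := fun i => PySem.List.pyGetD ((boxes.map pvF4).map (fun c => (c.2.2.1 - c.1) * (c.2.2.2 - c.2.1))) i 0)
    rw [huv] at hndO hpw ⊢
    have htnu : ((t : Int)) ∉ u := by
      rcases List.nodup_append.mp hndO with ⟨_, _, hdisj⟩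
      intro hin
      exact hdisj _ hin _ (by simp) rfl
    rw [pvMarkVal_append _ _ _ _ htnu]
    have hcross := (List.pairwise_append.mp hpw).2.2
    -- any over the suffix equals any over all boxes
    have hglt : ∀ j : Int,
        pvG (boxes.map pvF4) ((boxes.map pvF4).map (fun c => (c.2.2.1 - c.1) * (c.2.2.2 - c.2.1))) (t : Int) j = true →
        PySem.List.pyGetD ((boxes.map pvF4).map (fun c => (c.2.2.1 - c.1) * (c.2.2.2 - c.2.1))) (t : Int) 0
          < PySem.List.pyGetD ((boxes.map pvF4).map (fun c => (c.2.2.1 - c.1) * (c.2.2.2 - c.2.1))) j 0 := by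
      intro j hj
      rcases hco : PySem.List.pyGetD (boxes.map pvF4) (t : Int) (0, 0, 0, 0) with ⟨a, b, c, d⟩
      simp only [pvG, hco, pvFCond, Bool.and_eq_true, decide_eq_true_eq] at hj
      exact hj.1
    cases hv : v.any (pvG (boxes.map pvF4) ((boxes.map pvF4).map (fun c => (c.2.2.1 - c.1) * (c.2.2.2 - c.2.1))) (t : Int)) with
    | true =>
      obtain ⟨j, hjv, hgj⟩ := List.any_eq_true.mp hv
      have hjO : j ∈ u ++ (t : Int) :: v := by simp [hjv]
      have hjb : 0 ≤ j ∧ j < (boxes.length : Int) := by rw [← hOmem, huv]; exact hjO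
      have hm : j = ((j.toNat : Nat) : Int) := by omega
      rw [hm] at hgj
      rw [hG t j.toNat ht (by omega)] at hgj
      symm
      exact List.any_eq_true.mpr ⟨boxes[j.toNat]'(by omega), List.getElem_mem _, hgj⟩
    | false =>
      symm
      rw [List.any_eq_false]
      intro b hb
      obtain ⟨m, hmlt, rfl⟩ := List.mem_iff_getElem.mp hb
      intro hcb
      have hgm : pvG (boxes.map pvF4) ((boxes.map pvF4).map (fun c => (c.2.2.1 - c.1) * (c.2.2.2 - c.2.1))) (t : Int) (m : Int) = true := by
        rw [hG t m ht hmlt]; exact hcb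
      have hmO : ((m : Int)) ∈ u ++ (t : Int) :: v := by
        rw [← huv, hOmem]; constructor <;> omega
      rcases List.mem_append.mp hmO with hmu | hmtv
      · have hle := hcross _ hmu ((t : Int)) (by simp)
        have := hglt _ hgm
        omega
      · rcases List.mem_cons.mp hmtv with hmt | hmv
        · have : m = t := by omega
          subst this
          rw [hG m m ht ht, pvCond_self] at hgm
          exact absurd hgm (by simp)
        · exact List.any_eq_false.mp hv _ hmv hgm

-- ===== VERDICT (by name: the statement is the Claim_ definition above) =====
theorem remove_nested_boxes_spec : Claim_equal_remove_nested_boxes := by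
  intro boxes _ hpre
  unfold Spec_remove_nested_boxes
  rw [pvA_filter boxes hpre, pvB_filter boxes hpre]
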